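-- pv_equiv track=rewrite | github.com/dreipfundflachs/Project-Euler-Solutions | problem_023.py | sieve_prime_factors
-- ===== SOURCE A (Python) =====
-- def sieve_prime_factors(N: int) -> list[list[int]]:
--     """ For each integer n <= N, uses a sieving method to compute the list of
--     all prime factors of n, each prime being repeated as many times as its
--     multiplicity. For example:
--         sieve_prime_factors(6) = [[], [], [2], [3], [2, 2], [5], [2, 3]]
--     """
--     prime_flags = [True for _ in range(N + 1)]
--     prime_flags[0], prime_flags[1] = False, False
--     prime_factors = [[] for _ in range(N + 1)]
--
--     for (p, is_prime) in enumerate(prime_flags):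
--         if is_prime:
--             for m in range(p, N + 1, p):
--                 prime_factors[m].append(p)
--                 prime_flags[m] = False
--             k = 2
--             while (q := p**k) <= N:
--                 for m in range(q, N + 1, q):
--                     prime_factors[m].append(p)
--                 k += 1
--     return prime_factors
-- ===== SOURCE B (Python) =====
-- def sieve_prime_factors(N: int) -> list[list[int]]:
--     """Two phases instead of A's combined marking: first build a table spf
--     where spf[m] is the smallest prime factor of m (one conditional sieve
--     pass per prime), then read each n's factor list off the table by
--     repeatedly dividing by spf[m]."""
--     size = N + 1
--     spf = [0] * size
--     for d in range(2, size):
--         if spf[d] == 0: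
--             for m in range(d, size, d):
--                 if spf[m] == 0:
--                     spf[m] = d
--     result = []
--     for n in range(size):
--         factors = []
--         m = n
--         while m > 1:
--             p = spf[m]
--             factors.append(p)
--             m //= p
--         result.append(factors)
--     return result
-- ===== Notes on version B (the rewrite author's own statement) =====
-- stated objective: faster
-- what changed: A interleaves a boolean primality table with marking passes that append each prime p to prime_factors[m] once per power pass over the whole table; B instead builds a smallest-prime-factor table spf (one conditional write per cell) and then derives each n's factor list independently by repeatedly dividing by spf[m], avoiding A's repeated per-power list-append passes.
import Mathlib
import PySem

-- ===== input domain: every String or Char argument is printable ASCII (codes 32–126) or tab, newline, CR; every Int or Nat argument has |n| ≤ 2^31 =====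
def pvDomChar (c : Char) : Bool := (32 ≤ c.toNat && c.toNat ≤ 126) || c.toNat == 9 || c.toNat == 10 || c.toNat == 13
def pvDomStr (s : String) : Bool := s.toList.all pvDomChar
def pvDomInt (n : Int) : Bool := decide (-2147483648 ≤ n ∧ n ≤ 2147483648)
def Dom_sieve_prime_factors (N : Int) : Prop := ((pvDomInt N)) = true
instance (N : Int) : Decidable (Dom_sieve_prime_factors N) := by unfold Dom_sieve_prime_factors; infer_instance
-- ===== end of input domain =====

-- B builds a smallest-prime-factor table first and then reads each n's factors off it by
-- division chains (instead of A's combined boolean-flags + per-power marking passes);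
-- return values proved equal for all N >= 1 (A raises IndexError for N <= 0).

-- ===== PORT A =====
-- one body of the first inner loop: prime_factors[m].append(p); prime_flags[m] = False
def pfMark (p : Nat) (st : List Bool × List (List Int)) (m : Int) : List Bool × List (List Int) :=
  (st.1.set m.toNat false, st.2.modify m.toNat (fun l => l ++ [(p : Int)]))

-- one body of the k-power inner loop: prime_factors[m].append(p)
def pfApp (p : Nat) (fs : List (List Int)) (m : Int) : List (List Int) :=
  fs.modify m.toNat (fun l => l ++ [(p : Int)])

-- the 'while (q := p**k) <= N' loop; fuel only guards termination (never exhausted on Pre_)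
def pfPowLoop (p : Nat) (N : Int) : Nat → Nat → List (List Int) → List (List Int)
  | 0, _, fs => fs
  | fuel+1, k, fs =>
    if (p : Int) ^ k ≤ N then
      pfPowLoop p N fuel (k+1) ((PySem.List.pyRange ((p : Int) ^ k) (N+1) ((p : Int) ^ k)).foldl (pfApp p) fs)
    else fs

-- one iteration of 'for (p, is_prime) in enumerate(prime_flags)' (the flags list is read live)
def pfStep (N : Int) (st : List Bool × List (List Int)) (p : Nat) : List Bool × List (List Int) :=
  if st.1.getD p false then
    let st1 := (PySem.List.pyRange (p : Int) (N+1) (p : Int)).foldl (pfMark p) st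
    (st1.1, pfPowLoop p N (N+1).toNat 2 st1.2)
  else st

def sieve_prime_factors (N : Int) : List (List Int) :=
  let n1 := (N + 1).toNat
  let flags0 := ((List.replicate n1 true).set 0 false).set 1 false
  let factors0 := List.replicate n1 ([] : List Int)
  ((List.range n1).foldl (pfStep N) (flags0, factors0)).2

-- ===== PORT B =====
-- 'for m in range(d, size, d): if spf[m] == 0: spf[m] = d' for one d with spf[d] == 0
def spfStep (N : Int) (spf : List Nat) (d : Int) : List Nat :=
  if spf.getD d.toNat 0 = 0 then
    (PySem.List.pyRange d (N+1) d).foldl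
      (fun s m => if s.getD m.toNat 0 = 0 then s.set m.toNat d.toNat else s) spf
  else spf

-- phase 1 of Source B: the smallest-prime-factor table spf
def spfBuild (N : Int) : List Nat :=
  (PySem.List.pyRange 2 (N+1) 1).foldl (spfStep N) (List.replicate (N+1).toNat 0)

-- phase 2: 'while m > 1: factors.append(spf[m]); m //= spf[m]'; fuel only guards termination
def sfLoop (spf : List Nat) : Nat → Nat → List Int → List Int
  | 0, _, acc => acc
  | fuel+1, m, acc =>
    if 1 < m then sfLoop spf fuel (m / spf.getD m 0) (acc ++ [(spf.getD m 0 : Int)]) else acc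

def sieve_prime_factors_alt (N : Int) : List (List Int) :=
  (List.range (N + 1).toNat).map (fun n => sfLoop (spfBuild N) (n + 1) n [])

-- ===== PRECONDITION & SPEC =====
-- Pre_ excludes exactly N ≤ 0, where A raises IndexError (prime_flags[1] on a list of length ≤ 1)
def Pre_sieve_prime_factors (N : Int) : Prop := 1 ≤ N
instance (N : Int) : Decidable (Pre_sieve_prime_factors N) := by unfold Pre_sieve_prime_factors; infer_instance
def pvWitness_sieve_prime_factors : Int := 6

def Spec_sieve_prime_factors (N : Int) (out : List (List Int)) : Prop := out = sieve_prime_factors_alt N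
instance (N : Int) (out : List (List Int)) : Decidable (Spec_sieve_prime_factors N out) := by unfold Spec_sieve_prime_factors; infer_instance

-- ===== CLAIM (what is proved, stated in full; the proofs are below) =====
def Claim_equal_sieve_prime_factors : Prop := ∀ (N : Int), Dom_sieve_prime_factors N → Pre_sieve_prime_factors N → Spec_sieve_prime_factors N (sieve_prime_factors N)

-- ===== LEMMAS AND PROOFS =====

-- getD through set / modify
theorem pvGetD_set {α : Type} (l : List α) (i j : Nat) (a d : α) (hi : i < l.length) :
    (l.set i a).getD j d = if i = j then a else l.getD j d := by
  by_cases h : i = j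
  · subst h; simp [List.getD_eq_getElem?_getD, List.getElem?_set, hi]
  · simp [List.getD_eq_getElem?_getD, List.getElem?_set, h]

theorem pvGetD_modify {α : Type} (l : List α) (i j : Nat) (f : α → α) (d : α) :
    (l.modify i f).getD j d = if i = j ∧ j < l.length then f (l.getD j d) else l.getD j d := by
  by_cases h : i = j
  · subst h
    by_cases hj : i < l.length
    · simp [List.getD_eq_getElem?_getD, List.getElem?_modify, List.getElem?_eq_getElem hj, hj]
    · simp [List.getD_eq_getElem?_getD, List.getElem?_modify,
        List.getElem?_eq_none (show l.length ≤ i by omega), hj]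
  · simp [List.getD_eq_getElem?_getD, List.getElem?_modify, h]

-- the specification of A's partially built table: primes < P sieved in, each with its multiplicity
def sieveSpec (P m : Nat) : List Nat :=
  (List.range P).flatMap (fun q => if Nat.Prime q then List.replicate (Nat.factorization m q) q else [])

def flagSpec (P m : Nat) : Bool := decide (2 ≤ m ∧ ∀ q, q < P → Nat.Prime q → ¬ q ∣ m)

def pfInit (N : Int) : List Bool × List (List Int) :=
  (((List.replicate (N+1).toNat true).set 0 false).set 1 false, List.replicate (N+1).toNat ([] : List Int))

def pfRun (N : Int) (P : Nat) : List Bool × List (List Int) :=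
  (List.range P).foldl (pfStep N) (pfInit N)

theorem sieve_eq_run (N : Int) : sieve_prime_factors N = (pfRun N (N+1).toNat).2 := rfl

theorem pfRun_succ (N : Int) (P : Nat) : pfRun N (P+1) = pfStep N (pfRun N P) P := by
  simp [pfRun, List.range_succ]

theorem sieveSpec_succ (P m : Nat) :
    sieveSpec (P+1) m = sieveSpec P m ++ (if Nat.Prime P then List.replicate (Nat.factorization m P) P else []) := by
  simp [sieveSpec, List.range_succ]

theorem pvPyRange_nodup (a b s : Int) (hs : 0 < s) : (PySem.List.pyRange a b s).Nodup := by
  rw [PySem.List.pyRange_of_pos a b hs]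
  refine List.Nodup.map ?_ (List.nodup_range)
  intro x y h
  have h2 : s * (x : Int) = s * (y : Int) := by linarith
  have := mul_left_cancel₀ (show (s : Int) ≠ 0 by omega) h2
  exact_mod_cast this

theorem pvPyRange_count (a b s : Int) (hs : 0 < s) (x : Int) :
    (PySem.List.pyRange a b s).count x = if a ≤ x ∧ x < b ∧ s ∣ x - a then 1 else 0 := by
  by_cases h : a ≤ x ∧ x < b ∧ s ∣ x - a
  · rw [if_pos h]
    exact List.count_eq_one_of_mem (pvPyRange_nodup a b s hs)
      ((PySem.List.mem_pyRange_iff_of_pos hs x).2 h)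
  · rw [if_neg h]
    exact List.count_eq_zero_of_not_mem (fun hm => h ((PySem.List.mem_pyRange_iff_of_pos hs x).1 hm))

theorem pvDvd_sub_self (q x : Int) : q ∣ x - q ↔ q ∣ x :=
  ⟨fun h => by simpa using dvd_add h (dvd_refl q), fun h => dvd_sub h (dvd_refl q)⟩

-- effect of the first inner loop (append p to factors[m] and clear flags[m] for each m in L)
theorem pfMark_foldl_effect (p : Nat) :
    ∀ (L : List Int) (st : List Bool × List (List Int)),
      (∀ x ∈ L, 0 ≤ x ∧ x.toNat < st.1.length ∧ x.toNat < st.2.length) →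
      ((L.foldl (pfMark p) st).1.length = st.1.length ∧
       (L.foldl (pfMark p) st).2.length = st.2.length ∧
       (∀ m : Nat, (L.foldl (pfMark p) st).1.getD m false =
          (if (m : Int) ∈ L then false else st.1.getD m false)) ∧
       (∀ m : Nat, (L.foldl (pfMark p) st).2.getD m [] =
          st.2.getD m [] ++ List.replicate (L.count (m : Int)) (p : Int))) := by
  intro L
  induction L with
  | nil => intro st _; simp
  | cons x L ih =>
    intro st hL
    obtain ⟨hx0, hx1, hx2⟩ := hL x (List.mem_cons_self)
    have hfold : (x :: L).foldl (pfMark p) st = L.foldl (pfMark p) (pfMark p st x) := rfl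
    have hlen1 : (pfMark p st x).1.length = st.1.length := by simp [pfMark]
    have hlen2 : (pfMark p st x).2.length = st.2.length := by simp [pfMark, List.length_modify]
    obtain ⟨ih1, ih2, ih3, ih4⟩ := ih (pfMark p st x) (by
      intro y hy
      obtain ⟨a, b, c⟩ := hL y (List.mem_cons_of_mem _ hy)
      exact ⟨a, by omega, by omega⟩)
    rw [hfold]
    refine ⟨by omega, by omega, ?_, ?_⟩
    · intro m
      have hset : (pfMark p st x).1.getD m false =
          if x.toNat = m then false else st.1.getD m false := pvGetD_set _ _ _ _ _ hx1
      rw [ih3 m, hset]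
      by_cases hmL : (m : Int) ∈ L
      · rw [if_pos hmL, if_pos (List.mem_cons_of_mem _ hmL)]
      · by_cases hmx : (m : Int) = x
        · have hxm : x.toNat = m := by omega
          rw [if_neg hmL, if_pos hxm, if_pos (by simp [hmx])]
        · have hxm : ¬ x.toNat = m := by omega
          rw [if_neg hmL, if_neg hxm, if_neg (by simp [List.mem_cons, hmx, hmL])]
    · intro m
      have hmod : (pfMark p st x).2.getD m [] =
          if x.toNat = m ∧ m < st.2.length then st.2.getD m [] ++ [(p : Int)] else st.2.getD m [] :=
        pvGetD_modify _ _ _ _ _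
      have hcnt : (x :: L).count (m : Int) = L.count (m : Int) + if (m : Int) = x then 1 else 0 := by
        rw [List.count_cons]
        congr 1
        by_cases h : (m : Int) = x
        · simp [h]
        · have h2 : ¬ x = (m : Int) := fun hh => h hh.symm
          simp [h, h2]
      rw [ih4 m, hmod, hcnt]
      by_cases hmx : (m : Int) = x
      · have hxm : x.toNat = m := by omega
        rw [if_pos ⟨hxm, by omega⟩, if_pos hmx, List.append_assoc]
        simp [List.replicate_succ]
      · have hxm : ¬ x.toNat = m := by omega
        rw [if_neg (fun h => hxm h.1), if_neg hmx]
        simp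

-- effect of one power pass (append p to factors[m] for each m in L)
theorem pfApp_foldl_effect (p : Nat) :
    ∀ (L : List Int) (fs : List (List Int)),
      (∀ x ∈ L, 0 ≤ x ∧ x.toNat < fs.length) →
      ((L.foldl (pfApp p) fs).length = fs.length ∧
       (∀ m : Nat, (L.foldl (pfApp p) fs).getD m [] =
          fs.getD m [] ++ List.replicate (L.count (m : Int)) (p : Int))) := by
  intro L
  induction L with
  | nil => intro fs _; simp
  | cons x L ih =>
    intro fs hL
    obtain ⟨hx0, hx2⟩ := hL x (List.mem_cons_self)
    have hfold : (x :: L).foldl (pfApp p) fs = L.foldl (pfApp p) (pfApp p fs x) := rfl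
    have hlen : (pfApp p fs x).length = fs.length := by simp [pfApp, List.length_modify]
    obtain ⟨ih1, ih2⟩ := ih (pfApp p fs x) (by
      intro y hy
      obtain ⟨a, b⟩ := hL y (List.mem_cons_of_mem _ hy)
      exact ⟨a, by omega⟩)
    rw [hfold]
    refine ⟨by omega, ?_⟩
    intro m
    have hmod : (pfApp p fs x).getD m [] =
        if x.toNat = m ∧ m < fs.length then fs.getD m [] ++ [(p : Int)] else fs.getD m [] :=
      pvGetD_modify _ _ _ _ _
    have hcnt : (x :: L).count (m : Int) = L.count (m : Int) + if (m : Int) = x then 1 else 0 := by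
      rw [List.count_cons]
      congr 1
      by_cases h : (m : Int) = x
      · simp [h]
      · have h2 : ¬ x = (m : Int) := fun hh => h hh.symm
        simp [h, h2]
    rw [ih2 m, hmod, hcnt]
    by_cases hmx : (m : Int) = x
    · have hxm : x.toNat = m := by omega
      rw [if_pos ⟨hxm, by omega⟩, if_pos hmx, List.append_assoc]
      simp [List.replicate_succ]
    · have hxm : ¬ x.toNat = m := by omega
      rw [if_neg (fun h => hxm h.1), if_neg hmx]
      simp

-- once p^k exceeds N no further copies of p are due
theorem pvCnt_zero (p : Nat) (hp : Nat.Prime p) (N : Int) (k m : Nat) (hm : 0 < m)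
    (hmN : (m : Int) ≤ N) (hk : N < (p : Int) ^ k) : Nat.factorization m p < k := by
  by_contra h
  push_neg at h
  have hdvd : p ^ k ∣ m := (hp.pow_dvd_iff_le_factorization (by omega)).2 h
  have hle : p ^ k ≤ m := Nat.le_of_dvd hm hdvd
  have : ((p : Int)) ^ k ≤ (m : Int) := by exact_mod_cast hle
  omega

theorem pfPowLoop_effect (p : Nat) (hp : Nat.Prime p) (N : Int) (n1 : Nat) (hn1 : (n1 : Int) = N + 1) :
    ∀ (fuel k : Nat) (fs : List (List Int)), 2 ≤ k → fs.length = n1 → N < (p : Int) ^ (k + fuel) →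
      (pfPowLoop p N fuel k fs).length = n1 ∧
      ∀ m : Nat, m < n1 →
        (pfPowLoop p N fuel k fs).getD m [] =
          fs.getD m [] ++ List.replicate (if m = 0 then 0 else Nat.factorization m p + 1 - k) (p : Int) := by
  intro fuel
  induction fuel with
  | zero =>
    intro k fs hk hlen hfu
    refine ⟨by simpa [pfPowLoop] using hlen, ?_⟩
    intro m hm
    have hz : (if m = 0 then 0 else Nat.factorization m p + 1 - k) = 0 := by
      by_cases hm0 : m = 0
      · simp [hm0]
      · have : Nat.factorization m p < k :=
          pvCnt_zero p hp N k m (by omega) (by omega) (by simpa using hfu)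
        simp [hm0]; omega
    simp [pfPowLoop, hz]
  | succ fuel ih =>
    intro k fs hk hlen hfu
    have hp0 : (0 : Int) < (p : Int) := by exact_mod_cast hp.pos
    have hppos : (0 : Int) < (p : Int) ^ k := by positivity
    by_cases hcond : (p : Int) ^ k ≤ N
    · obtain ⟨hplen, hpget⟩ := pfApp_foldl_effect p
        (PySem.List.pyRange ((p : Int) ^ k) (N+1) ((p : Int) ^ k)) fs (by
          intro x hx
          rw [PySem.List.mem_pyRange_iff_of_pos hppos] at hx
          refine ⟨by omega, by omega⟩)
      have hstep : pfPowLoop p N (fuel+1) k fs =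
          pfPowLoop p N fuel (k+1)
            ((PySem.List.pyRange ((p : Int) ^ k) (N+1) ((p : Int) ^ k)).foldl (pfApp p) fs) := by
        simp [pfPowLoop, hcond]
      have hlen1 : ((PySem.List.pyRange ((p : Int) ^ k) (N+1) ((p : Int) ^ k)).foldl (pfApp p) fs).length = n1 := by
        rw [hplen]; exact hlen
      obtain ⟨ihlen, ihget⟩ := ih (k+1)
        ((PySem.List.pyRange ((p : Int) ^ k) (N+1) ((p : Int) ^ k)).foldl (pfApp p) fs)
        (by omega) hlen1 (by rw [show k + 1 + fuel = k + (fuel + 1) from by omega]; exact hfu)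
      rw [hstep]
      refine ⟨ihlen, ?_⟩
      intro m hm
      rw [ihget m hm, hpget m]
      have hcount : (PySem.List.pyRange ((p : Int) ^ k) (N+1) ((p : Int) ^ k)).count (m : Int) =
          if m ≠ 0 ∧ k ≤ Nat.factorization m p then 1 else 0 := by
        rw [pvPyRange_count _ _ _ hppos]
        have hmN : (m : Int) < N + 1 := by omega
        have hiff : ((p : Int) ^ k ≤ (m : Int) ∧ (p : Int) ^ k ∣ (m : Int)) ↔
            (m ≠ 0 ∧ k ≤ Nat.factorization m p) := by
          constructor
          · rintro ⟨h1, h2⟩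
            have hm0 : m ≠ 0 := by intro h; subst h; simp at h1; omega
            have hdvd : p ^ k ∣ m := by exact_mod_cast (by simpa using h2 : ((p ^ k : Nat) : Int) ∣ (m : Int))
            exact ⟨hm0, (hp.pow_dvd_iff_le_factorization hm0).1 hdvd⟩
          · rintro ⟨hm0, hv⟩
            have hdvd : p ^ k ∣ m := (hp.pow_dvd_iff_le_factorization hm0).2 hv
            have hle : p ^ k ≤ m := Nat.le_of_dvd (by omega) hdvd
            exact ⟨by exact_mod_cast hle, by exact_mod_cast hdvd⟩
        by_cases h : (m ≠ 0 ∧ k ≤ Nat.factorization m p)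
        · rw [if_pos h, if_pos ⟨(hiff.2 h).1, hmN, (pvDvd_sub_self _ _).2 (hiff.2 h).2⟩]
        · rw [if_neg h, if_neg (by rintro ⟨a, b, c⟩; exact h (hiff.1 ⟨a, (pvDvd_sub_self _ _).1 c⟩))]
      rw [hcount, List.append_assoc, ← List.replicate_add]
      congr 2
      by_cases hm0 : m = 0
      · simp [hm0]
      · simp only [hm0, ne_eq, not_false_eq_true, true_and, if_false]
        by_cases hkv : k ≤ Nat.factorization m p <;> simp [hkv] <;> omega
    · refine ⟨by simpa [pfPowLoop, hcond] using hlen, ?_⟩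
      intro m hm
      have hz : (if m = 0 then 0 else Nat.factorization m p + 1 - k) = 0 := by
        by_cases hm0 : m = 0
        · simp [hm0]
        · have : Nat.factorization m p < k :=
            pvCnt_zero p hp N k m (by omega) (by omega) (by omega)
          simp [hm0]; omega
      simp [pfPowLoop, hcond, hz]

theorem flagSpec_self (P : Nat) : flagSpec P P = decide (Nat.Prime P) := by
  by_cases hP : Nat.Prime P
  · simp only [flagSpec, hP, decide_true]
    rw [decide_eq_true_iff]
    refine ⟨hP.two_le, ?_⟩
    intro q hq hqp hdvd
    rcases (hP.eq_one_or_self_of_dvd q hdvd) with h | h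
    · exact absurd h (by have := hqp.two_le; omega)
    · omega
  · simp only [flagSpec, hP, decide_false]
    rw [decide_eq_false_iff_not]
    rintro ⟨h2, h⟩
    have hne1 : P ≠ 1 := by omega
    have hmf : Nat.Prime P.minFac := Nat.minFac_prime hne1
    have hdvd : P.minFac ∣ P := Nat.minFac_dvd P
    have hlt : P.minFac < P := by
      rcases lt_or_eq_of_le (Nat.le_of_dvd (by omega) hdvd) with h' | h'
      · exact h'
      · exact absurd (h' ▸ hmf) hP
    exact h P.minFac hlt hmf hdvd

theorem flagSpec_succ_notprime (P m : Nat) (h : ¬ Nat.Prime P) : flagSpec (P+1) m = flagSpec P m := by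
  simp only [flagSpec, decide_eq_decide]
  constructor <;> rintro ⟨h2, hq⟩ <;> refine ⟨h2, ?_⟩
  · intro q hlt hqp; exact hq q (by omega) hqp
  · intro q hlt hqp
    rcases Nat.lt_succ_iff_lt_or_eq.1 hlt with h' | h'
    · exact hq q h' hqp
    · subst h'; exact absurd hqp h

theorem flagSpec_succ_prime (P m : Nat) (hPr : Nat.Prime P) :
    (if P ∣ m ∧ m ≠ 0 then false else flagSpec P m) = flagSpec (P+1) m := by
  by_cases hc : P ∣ m ∧ m ≠ 0
  · rw [if_pos hc]
    symm
    simp only [flagSpec]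
    rw [decide_eq_false_iff_not]
    rintro ⟨h2, hq⟩
    exact hq P (by omega) hPr hc.1
  · rw [if_neg hc]
    simp only [flagSpec, decide_eq_decide]
    constructor <;> rintro ⟨h2, hq⟩ <;> refine ⟨h2, ?_⟩
    · intro q hlt hqp hdvd
      rcases Nat.lt_succ_iff_lt_or_eq.1 hlt with h' | h'
      · exact hq q h' hqp hdvd
      · subst h'
        exact hc ⟨hdvd, by omega⟩
    · intro q hlt hqp; exact hq q (by omega) hqp

theorem pfRun_invariant (N : Int) (hN : 1 ≤ N) (P : Nat) (hP : P ≤ (N+1).toNat) :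
    (pfRun N P).1.length = (N+1).toNat ∧ (pfRun N P).2.length = (N+1).toNat ∧
    (∀ m, m < (N+1).toNat → (pfRun N P).1.getD m false = flagSpec P m) ∧
    (∀ m, m < (N+1).toNat → (pfRun N P).2.getD m [] = (sieveSpec P m).map (fun q : Nat => (q : Int))) := by
  induction P with
  | zero =>
    have hrun : pfRun N 0 = pfInit N := rfl
    rw [hrun]
    refine ⟨by simp [pfInit], by simp [pfInit], ?_, ?_⟩
    · intro m hm
      unfold pfInit
      rw [pvGetD_set _ 1 m _ _ (by simp; omega), pvGetD_set _ 0 m _ _ (by simp; omega)]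
      rcases m with _ | _ | m
      · simp [flagSpec]
      · simp [flagSpec]
      · have hrep : (List.replicate (N+1).toNat true).getD (m+2) false = true := by
          rw [List.getD_eq_getElem _ _ (by simp; omega)]; simp
        rw [if_neg (by omega), if_neg (by omega), hrep]
        symm
        show decide _ = true
        rw [decide_eq_true_iff]
        exact ⟨by omega, fun q hq => absurd hq (by omega)⟩
    · intro m hm
      unfold pfInit
      rw [List.getD_eq_getElem _ _ (by simp; omega)]
      simp [sieveSpec]
  | succ P ih =>
    obtain ⟨l1, l2, hf, hfa⟩ := ih (by omega)
    have hPlt : P < (N+1).toNat := by omega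
    have hread : (pfRun N P).1.getD P false = decide (Nat.Prime P) := by
      rw [hf P hPlt, flagSpec_self]
    rw [pfRun_succ]
    unfold pfStep
    by_cases hPr : Nat.Prime P
    · rw [hread, if_pos (by simp [hPr])]
      have h2P : 2 ≤ P := hPr.two_le
      have hp0 : (0 : Int) < (P : Int) := by exact_mod_cast hPr.pos
      obtain ⟨m1, m2, mf, mfa⟩ := pfMark_foldl_effect P
        (PySem.List.pyRange (P : Int) (N+1) (P : Int)) (pfRun N P) (by
          intro x hx
          rw [PySem.List.mem_pyRange_iff_of_pos hp0] at hx
          refine ⟨by omega, by rw [l1]; omega, by rw [l2]; omega⟩)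
      have hbound : N < (P : Int) ^ (2 + (N+1).toNat) := by
        have h1 : (N+1).toNat < 2 ^ (N+1).toNat := Nat.lt_two_pow_self
        have h2 : (2 : Nat) ^ (N+1).toNat ≤ 2 ^ (2 + (N+1).toNat) :=
          Nat.pow_le_pow_right (by omega) (by omega)
        have h3 : (2 : Nat) ^ (2 + (N+1).toNat) ≤ P ^ (2 + (N+1).toNat) :=
          Nat.pow_le_pow_left h2P _
        have h4 : ((N+1).toNat : Int) < ((P ^ (2 + (N+1).toNat) : Nat) : Int) := by
          exact_mod_cast lt_of_lt_of_le h1 (le_trans h2 h3)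
        push_cast at h4
        omega
      obtain ⟨pl, pg⟩ := pfPowLoop_effect P hPr N (N+1).toNat (by omega) (N+1).toNat 2
        ((PySem.List.pyRange (P : Int) (N+1) (P : Int)).foldl (pfMark P) (pfRun N P)).2
        (by omega) (by rw [m2, l2]) (by rw [show 2 + (N+1).toNat = 2 + (N+1).toNat from rfl]; exact hbound)
      refine ⟨by rw [m1, l1], pl, ?_, ?_⟩
      · intro m hm
        rw [mf m, hf m hm]
        have hmemiff : ((m : Int) ∈ PySem.List.pyRange (P : Int) (N+1) (P : Int)) ↔ (P ∣ m ∧ m ≠ 0) := by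
          rw [PySem.List.mem_pyRange_iff_of_pos hp0, pvDvd_sub_self]
          constructor
          · rintro ⟨a, b, c⟩
            have : P ∣ m := by exact_mod_cast c
            exact ⟨this, by omega⟩
          · rintro ⟨hdvd, hm0⟩
            have hle : P ≤ m := Nat.le_of_dvd (by omega) hdvd
            exact ⟨by exact_mod_cast hle, by omega, by exact_mod_cast hdvd⟩
        rw [if_congr hmemiff rfl rfl, flagSpec_succ_prime P m hPr]
      · intro m hm
        rw [pg m hm, mfa m, hfa m hm]
        have hcount : (PySem.List.pyRange (P : Int) (N+1) (P : Int)).count (m : Int) =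
            if P ∣ m ∧ m ≠ 0 then 1 else 0 := by
          rw [pvPyRange_count _ _ _ hp0]
          by_cases h : P ∣ m ∧ m ≠ 0
          · rw [if_pos h]
            have hle : P ≤ m := Nat.le_of_dvd (by omega) h.1
            rw [if_pos ⟨by exact_mod_cast hle, by omega, (pvDvd_sub_self _ _).2 (by exact_mod_cast h.1)⟩]
          · rw [if_neg h]
            rw [if_neg (by
              rintro ⟨a, b, c⟩
              have hdvd : P ∣ m := by exact_mod_cast (pvDvd_sub_self _ _).1 c
              exact h ⟨hdvd, by omega⟩)]
        rw [hcount, sieveSpec_succ, if_pos hPr, List.map_append, List.map_replicate,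
          List.append_assoc, ← List.replicate_add]
        congr 2
        by_cases hm0 : m = 0
        · subst hm0
          simp [Nat.factorization_zero]
        · have hdvd1 : P ∣ m ↔ 1 ≤ Nat.factorization m P := by
            simpa using hPr.pow_dvd_iff_le_factorization (n := m) (k := 1) hm0
          by_cases hd : P ∣ m
          · rw [if_pos ⟨hd, hm0⟩]
            simp only [hm0, if_false]
            have := hdvd1.1 hd
            omega
          · rw [if_neg (fun h => hd h.1)]
            simp only [hm0, if_false]
            have : ¬ 1 ≤ Nat.factorization m P := fun h => hd (hdvd1.2 h)
            omega
    · rw [hread, if_neg (by simp [hPr])]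
      refine ⟨l1, l2, ?_, ?_⟩
      · intro m hm
        rw [hf m hm, flagSpec_succ_notprime P m hPr]
      · intro m hm
        rw [hfa m hm, sieveSpec_succ, if_neg hPr, List.append_nil]

theorem sieveSpec_count (P m q : Nat) :
    (sieveSpec P m).count q = if Nat.Prime q ∧ q < P then Nat.factorization m q else 0 := by
  induction P with
  | zero => simp [sieveSpec]
  | succ P ih =>
    rw [sieveSpec_succ, List.count_append, ih]
    by_cases hp : Nat.Prime P
    · rw [if_pos hp, List.count_replicate]
      by_cases hq : q = P
      · subst hq
        simp [hp, Nat.lt_irrefl, Nat.lt_succ_iff]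
      · have h1 : ¬ (P == q) = true := by simp [beq_iff_eq]; omega
        rw [if_neg h1]
        have h2 : (Nat.Prime q ∧ q < P + 1) ↔ (Nat.Prime q ∧ q < P) := by
          constructor <;> rintro ⟨a, b⟩ <;> exact ⟨a, by omega⟩
        rw [if_congr h2 rfl rfl]
        omega
    · rw [if_neg hp]
      have h2 : (Nat.Prime q ∧ q < P + 1) ↔ (Nat.Prime q ∧ q < P) := by
        constructor <;> rintro ⟨a, b⟩
        · refine ⟨a, ?_⟩
          rcases Nat.lt_succ_iff_lt_or_eq.1 b with h' | h'
          · exact h'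
          · subst h'; exact absurd a hp
        · exact ⟨a, by omega⟩
      rw [if_congr h2 rfl rfl]
      simp

theorem sieveSpec_sorted (P m : Nat) :
    (∀ x ∈ sieveSpec P m, x < P) ∧ List.Pairwise (· ≤ ·) (sieveSpec P m) := by
  induction P with
  | zero => simp [sieveSpec]
  | succ P ih =>
    rw [sieveSpec_succ]
    have hblock : ∀ x ∈ (if Nat.Prime P then List.replicate (Nat.factorization m P) P else []), x = P := by
      intro x hx
      by_cases hp : Nat.Prime P
      · rw [if_pos hp] at hx; exact List.eq_of_mem_replicate hx
      · rw [if_neg hp] at hx; simp at hx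
    constructor
    · intro x hx
      rcases List.mem_append.1 hx with h | h
      · have := ih.1 x h; omega
      · have := hblock x h; omega
    · rw [List.pairwise_append]
      refine ⟨ih.2, ?_, ?_⟩
      · by_cases hp : Nat.Prime P
        · rw [if_pos hp]
          exact List.sortedLE_iff_pairwise.1 (List.sortedLE_replicate _)
        · rw [if_neg hp]; simp
      · intro a ha b hb
        have h1 := ih.1 a ha
        have h2 := hblock b hb
        omega

theorem sieveSpec_eq_primeFactorsList (P m : Nat) (hm : m < P) :
    sieveSpec P m = m.primeFactorsList := by
  have hperm : (sieveSpec P m).Perm m.primeFactorsList := by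
    rw [List.perm_iff_count]
    intro q
    rw [show List.count q (sieveSpec P m) = (sieveSpec P m).count q from rfl, sieveSpec_count]
    by_cases hq : Nat.Prime q
    · by_cases hm0 : m = 0
      · subst hm0
        simp [Nat.primeFactorsList_zero, Nat.factorization_zero]
      · rw [show List.count q m.primeFactorsList = Nat.factorization m q from
          Nat.primeFactorsList_count_eq]
        by_cases hlt : q < P
        · simp [hq, hlt]
        · have hqm : ¬ q ∣ m := fun hdvd => by
            have := Nat.le_of_dvd (by omega) hdvd; omega
          rw [Nat.factorization_eq_zero_of_not_dvd hqm]
          simp [hq, hlt]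
    · have h1 : List.count q m.primeFactorsList = 0 :=
        List.count_eq_zero_of_not_mem (fun hmem => hq (Nat.prime_of_mem_primeFactorsList hmem))
      rw [h1]
      simp [hq]
  exact List.Perm.eq_of_pairwise (fun a b _ _ h1 h2 => Nat.le_antisymm h1 h2)
    (sieveSpec_sorted P m).2 (List.sortedLE_iff_pairwise.1 (Nat.primeFactorsList_sorted m)) hperm

theorem pvPfl_cons (m : Nat) (h2 : 2 ≤ m) :
    m.primeFactorsList = m.minFac :: (m / m.minFac).primeFactorsList := by
  obtain ⟨n, rfl⟩ : ∃ n, m = n + 2 := ⟨m - 2, by omega⟩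
  exact Nat.primeFactorsList_add_two n

-- effect of one conditional marking pass of Source B's phase 1
theorem spfPass_effect (dv : Nat) (hd : 2 ≤ dv) :
    ∀ (L : List Int) (s : List Nat),
      (∀ x ∈ L, 0 ≤ x ∧ x.toNat < s.length) →
      ((L.foldl (fun s m => if s.getD m.toNat 0 = 0 then s.set m.toNat dv else s) s).length = s.length ∧
       ∀ m : Nat, (L.foldl (fun s m => if s.getD m.toNat 0 = 0 then s.set m.toNat dv else s) s).getD m 0 =
          if (m : Int) ∈ L ∧ s.getD m 0 = 0 then dv else s.getD m 0) := by
  intro L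
  induction L with
  | nil => intro s _; simp
  | cons x L ih =>
    intro s hL
    obtain ⟨hx0, hx1⟩ := hL x (List.mem_cons_self)
    have hfold : (x :: L).foldl (fun s m => if s.getD m.toNat 0 = 0 then s.set m.toNat dv else s) s =
        L.foldl (fun s m => if s.getD m.toNat 0 = 0 then s.set m.toNat dv else s)
          (if s.getD x.toNat 0 = 0 then s.set x.toNat dv else s) := rfl
    rw [hfold]
    have hlen1 : (if s.getD x.toNat 0 = 0 then s.set x.toNat dv else s).length = s.length := by
      by_cases h : s.getD x.toNat 0 = 0
      · rw [if_pos h]; simp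
      · rw [if_neg h]
    obtain ⟨ih1, ih2⟩ := ih (if s.getD x.toNat 0 = 0 then s.set x.toNat dv else s) (by
      intro y hy
      obtain ⟨a, b⟩ := hL y (List.mem_cons_of_mem _ hy)
      exact ⟨a, by omega⟩)
    refine ⟨by omega, ?_⟩
    intro m
    rw [ih2 m]
    by_cases hx0' : s.getD x.toNat 0 = 0
    · rw [if_pos hx0']
      have hset : (s.set x.toNat dv).getD m 0 = if x.toNat = m then dv else s.getD m 0 :=
        pvGetD_set _ _ _ _ _ hx1
      by_cases hmx : (m : Int) = x
      · have hxm : x.toNat = m := by omega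
        have hsm : s.getD m 0 = 0 := by rw [← hxm]; exact hx0'
        rw [hset, if_pos hxm]
        rw [if_neg (by rintro ⟨_, h⟩; omega), if_pos ⟨by simp [hmx], hsm⟩]
      · have hxm : ¬ x.toNat = m := by omega
        rw [hset, if_neg hxm]
        have hmem : ((m : Int) ∈ x :: L) ↔ ((m : Int) ∈ L) := by
          simp [List.mem_cons, hmx]
        by_cases hc : (m : Int) ∈ L ∧ s.getD m 0 = 0
        · rw [if_pos hc, if_pos ⟨hmem.symm.1 hc.1, hc.2⟩]
        · rw [if_neg hc, if_neg (by rintro ⟨a, b⟩; exact hc ⟨hmem.1 a, b⟩)]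
    · rw [if_neg hx0']
      by_cases hmx : (m : Int) = x
      · have hxm : x.toNat = m := by omega
        have hsm : ¬ s.getD m 0 = 0 := by rw [← hxm]; exact hx0'
        rw [if_neg (by rintro ⟨_, h⟩; exact hsm h), if_neg (by rintro ⟨_, h⟩; exact hsm h)]
      · have hmem : ((m : Int) ∈ x :: L) ↔ ((m : Int) ∈ L) := by
          simp [List.mem_cons, hmx]
        by_cases hc : (m : Int) ∈ L ∧ s.getD m 0 = 0
        · rw [if_pos hc, if_pos ⟨hmem.symm.1 hc.1, hc.2⟩]
        · rw [if_neg hc, if_neg (by rintro ⟨a, b⟩; exact hc ⟨hmem.1 a, b⟩)]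

def spfRun (N : Int) (t : Nat) : List Nat :=
  (List.range t).foldl (fun s (k : Nat) => spfStep N s (2 + (k : Int))) (List.replicate (N+1).toNat 0)

theorem spfBuild_eq_run (N : Int) : spfBuild N = spfRun N ((N+1) - 2).toNat := by
  unfold spfBuild spfRun
  rw [PySem.List.pyRange_one, List.foldl_map]

theorem spfRun_succ (N : Int) (t : Nat) :
    spfRun N (t+1) = spfStep N (spfRun N t) (2 + (t : Int)) := by
  simp [spfRun, List.range_succ]

theorem minFac_two_le (m : Nat) (hm : 2 ≤ m) : 2 ≤ m.minFac :=
  (Nat.minFac_prime (by omega)).two_le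

theorem spfRun_invariant (N : Int) (hN : 1 ≤ N) (t : Nat) (ht : t ≤ ((N+1) - 2).toNat) :
    (spfRun N t).length = (N+1).toNat ∧
    ∀ m, m < (N+1).toNat → (spfRun N t).getD m 0 =
      if 2 ≤ m ∧ Nat.minFac m < 2 + t then Nat.minFac m else 0 := by
  induction t with
  | zero =>
    refine ⟨by simp [spfRun], ?_⟩
    intro m hm
    have hrun : spfRun N 0 = List.replicate (N+1).toNat 0 := rfl
    rw [hrun, List.getD_eq_getElem _ _ (by simpa using hm)]
    rw [if_neg (by rintro ⟨h2, hlt⟩; have := minFac_two_le m h2; omega)]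
    simp
  | succ t ih =>
    obtain ⟨l1, hv⟩ := ih (by omega)
    have htn : ((2 : Int) + (t : Int)).toNat = 2 + t := by omega
    have hD : 2 + t < (N+1).toNat := by omega
    have hread : (spfRun N t).getD (2 + t) 0 =
        if Nat.minFac (2 + t) < 2 + t then Nat.minFac (2 + t) else 0 := by
      rw [hv (2 + t) hD]
      by_cases h : Nat.minFac (2 + t) < 2 + t
      · rw [if_pos ⟨by omega, h⟩, if_pos h]
      · rw [if_neg (by rintro ⟨_, hh⟩; exact h hh), if_neg h]
    rw [spfRun_succ]
    unfold spfStep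
    simp only [htn]
    by_cases hPr : Nat.Prime (2 + t)
    · have hmfD : Nat.minFac (2 + t) = 2 + t := (Nat.prime_def_minFac.1 hPr).2
      rw [hread, if_pos (by rw [hmfD]; simp)]
      have hDpos : (0 : Int) < 2 + (t : Int) := by omega
      obtain ⟨p1, p2⟩ := spfPass_effect (2 + t) (by omega)
        (PySem.List.pyRange (2 + (t : Int)) (N+1) (2 + (t : Int))) (spfRun N t) (by
          intro x hx
          rw [PySem.List.mem_pyRange_iff_of_pos hDpos] at hx
          refine ⟨by omega, by omega⟩)
      refine ⟨by omega, ?_⟩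
      intro m hm
      rw [p2 m, hv m hm]
      have hmem : ((m : Int) ∈ PySem.List.pyRange (2 + (t : Int)) (N+1) (2 + (t : Int))) ↔
          ((2 + t) ∣ m ∧ m ≠ 0) := by
        rw [PySem.List.mem_pyRange_iff_of_pos hDpos, pvDvd_sub_self]
        constructor
        · rintro ⟨a, b, c⟩
          have hdvd : (2 + t) ∣ m := by exact_mod_cast c
          exact ⟨hdvd, by omega⟩
        · rintro ⟨hdvd, hm0⟩
          have hle : 2 + t ≤ m := Nat.le_of_dvd (by omega) hdvd
          exact ⟨by omega, by omega, by exact_mod_cast hdvd⟩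
      by_cases h2m : 2 ≤ m
      · by_cases hlt : Nat.minFac m < 2 + t
        · have hnz : ¬ (if 2 ≤ m ∧ Nat.minFac m < 2 + t then Nat.minFac m else 0) = 0 := by
            rw [if_pos ⟨h2m, hlt⟩]
            have := minFac_two_le m h2m; omega
          rw [if_neg (by rintro ⟨_, h⟩; exact hnz h), if_pos ⟨h2m, hlt⟩,
            if_pos ⟨h2m, by omega⟩]
        · have hz : (if 2 ≤ m ∧ Nat.minFac m < 2 + t then Nat.minFac m else 0) = 0 := by
            rw [if_neg (by rintro ⟨_, h⟩; exact hlt h)]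
          by_cases hdvd : (2 + t) ∣ m
          · have hmfm : Nat.minFac m = 2 + t := by
              have h1 : Nat.minFac m ≤ 2 + t := Nat.minFac_le_of_dvd (by omega) hdvd
              omega
            rw [if_pos ⟨hmem.2 ⟨hdvd, by omega⟩, hz⟩, if_pos ⟨h2m, by omega⟩, hmfm]
          · have hne : ¬ Nat.minFac m < 2 + t + 1 := by
              intro h
              have hmfm : Nat.minFac m = 2 + t := by omega
              exact hdvd (hmfm ▸ Nat.minFac_dvd m)
            rw [if_neg (by rintro ⟨a, _⟩; exact hdvd (hmem.1 a).1), hz,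
              if_neg (by rintro ⟨_, h⟩; exact hne (by omega))]
      · have hnm : ¬ (m : Int) ∈ PySem.List.pyRange (2 + (t : Int)) (N+1) (2 + (t : Int)) := by
          intro h
          rw [PySem.List.mem_pyRange_iff_of_pos hDpos] at h
          omega
        rw [if_neg (by rintro ⟨a, _⟩; exact hnm a),
          if_neg (by rintro ⟨a, _⟩; exact h2m a), if_neg (by rintro ⟨a, _⟩; exact h2m a)]
    · have hmfD : Nat.minFac (2 + t) < 2 + t := by
        have h1 : Nat.minFac (2 + t) ≤ 2 + t := Nat.minFac_le (by omega)
        have h2 : Nat.minFac (2 + t) ≠ 2 + t := fun h =>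
          hPr (Nat.prime_def_minFac.2 ⟨by omega, h⟩)
        omega
      rw [hread, if_neg (by rw [if_pos hmfD]; have := minFac_two_le (2 + t) (by omega); omega)]
      refine ⟨l1, ?_⟩
      intro m hm
      rw [hv m hm]
      by_cases h2m : 2 ≤ m
      · have hne : Nat.minFac m ≠ 2 + t := by
          intro h
          exact hPr (h ▸ Nat.minFac_prime (show m ≠ 1 by omega))
        by_cases hlt : Nat.minFac m < 2 + t
        · rw [if_pos ⟨h2m, hlt⟩, if_pos ⟨h2m, by omega⟩]
        · rw [if_neg (by rintro ⟨_, h⟩; exact hlt h),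
            if_neg (by rintro ⟨_, h⟩; exact hlt (by omega))]
      · rw [if_neg (by rintro ⟨a, _⟩; exact h2m a), if_neg (by rintro ⟨a, _⟩; exact h2m a)]

theorem spf_minFac (N : Int) (hN : 1 ≤ N) :
    ∀ m, 2 ≤ m → m < (N+1).toNat → (spfBuild N).getD m 0 = Nat.minFac m := by
  intro m h2 hm
  obtain ⟨_, hv⟩ := spfRun_invariant N hN ((N+1) - 2).toNat le_rfl
  rw [spfBuild_eq_run, hv m hm]
  have hle : Nat.minFac m ≤ m := Nat.minFac_le (by omega)
  rw [if_pos ⟨h2, by omega⟩]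

theorem sfLoop_spec (spf : List Nat) (size : Nat)
    (hspf : ∀ j, 2 ≤ j → j < size → spf.getD j 0 = Nat.minFac j) :
    ∀ (fuel m : Nat) (acc : List Int), m < size → m < fuel →
      sfLoop spf fuel m acc = acc ++ m.primeFactorsList.map (fun q : Nat => (q : Int)) := by
  intro fuel
  induction fuel with
  | zero => intro m acc _ hf; omega
  | succ fuel ih =>
    intro m acc hms hf
    by_cases hm : 1 < m
    · have hstep : sfLoop spf (fuel+1) m acc =
          sfLoop spf fuel (m / spf.getD m 0) (acc ++ [(spf.getD m 0 : Int)]) := by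
        simp [sfLoop, hm]
      rw [hstep, hspf m (by omega) hms]
      have hp2 : 2 ≤ m.minFac := minFac_two_le m (by omega)
      have hmd : m / m.minFac < m := Nat.div_lt_self (by omega) (by omega)
      rw [ih (m / m.minFac) (acc ++ [(m.minFac : Int)]) (by omega) (by omega),
        pvPfl_cons m (by omega)]
      simp
    · have hstep : sfLoop spf (fuel+1) m acc = acc := by simp [sfLoop, hm]
      have hnil : m.primeFactorsList = [] := (Nat.primeFactorsList_eq_nil m).2 (by omega)
      rw [hstep, hnil]
      simp

theorem A_eq_factorTable (N : Int) (hN : 1 ≤ N) :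
    sieve_prime_factors N =
      (List.range (N+1).toNat).map (fun m => m.primeFactorsList.map (fun q : Nat => (q : Int))) := by
  obtain ⟨l1, l2, hf, hfa⟩ := pfRun_invariant N hN (N+1).toNat le_rfl
  rw [sieve_eq_run]
  apply List.ext_getElem
  · rw [l2]; simp
  · intro i h1 h2
    have hi : i < (N+1).toNat := by simpa using h2
    rw [← List.getD_eq_getElem _ [] h1, hfa i hi, sieveSpec_eq_primeFactorsList _ _ hi]
    simp

theorem B_eq_factorTable (N : Int) (hN : 1 ≤ N) :
    sieve_prime_factors_alt N =
      (List.range (N+1).toNat).map (fun m => m.primeFactorsList.map (fun q : Nat => (q : Int))) := by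
  apply List.map_congr_left
  intro n hn
  exact sfLoop_spec (spfBuild N) ((N+1).toNat) (spf_minFac N hN) (n+1) n []
    (List.mem_range.1 hn) (by omega)

-- ===== VERDICT (by name: the statement is the Claim_ definition above) =====
theorem sieve_prime_factors_spec : Claim_equal_sieve_prime_factors := by
  intro N _ hN
  unfold Spec_sieve_prime_factors
  rw [A_eq_factorTable N hN, B_eq_factorTable N hN]
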